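-- pv_equiv track=rewrite | github.com/SeungJaeYoon/Polarization_calculate | polarization_v4.py | find_born
-- ===== SOURCE A (Python) =====
-- def find_born(x):
-- 	line_num=0
-- 	start=0
-- 	end=0
-- 	for i in x:
-- 		line_num+=1
-- 		if 'BORN EFFECTIVE CHARGES' in i:
-- 			start=line_num
-- 		elif 'INTERNAL STRAIN TENSOR FOR ION    1' in i:
-- 			end=line_num
-- 	return [start,end]
-- ===== SOURCE B (Python) =====
-- def find_born(x):
--     lines = list(x)
--     start = 0
--     end = 0
--     for ln in range(len(lines), 0, -1):
--         line = lines[ln - 1]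
--         if 'BORN EFFECTIVE CHARGES' in line:
--             if start == 0:
--                 start = ln
--         elif 'INTERNAL STRAIN TENSOR FOR ION    1' in line and end == 0:
--             end = ln
--         if start != 0 and end != 0:
--             break
--     return [start, end]
-- ===== Notes on version B (the rewrite author's own statement) =====
-- stated objective: alternative
-- what changed: B scans the lines backwards keeping the first hit per marker (= A's last hit) and breaks as soon as both line numbers are found, instead of A's full forward sweep that overwrites the numbers on every match.
import Mathlib
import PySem

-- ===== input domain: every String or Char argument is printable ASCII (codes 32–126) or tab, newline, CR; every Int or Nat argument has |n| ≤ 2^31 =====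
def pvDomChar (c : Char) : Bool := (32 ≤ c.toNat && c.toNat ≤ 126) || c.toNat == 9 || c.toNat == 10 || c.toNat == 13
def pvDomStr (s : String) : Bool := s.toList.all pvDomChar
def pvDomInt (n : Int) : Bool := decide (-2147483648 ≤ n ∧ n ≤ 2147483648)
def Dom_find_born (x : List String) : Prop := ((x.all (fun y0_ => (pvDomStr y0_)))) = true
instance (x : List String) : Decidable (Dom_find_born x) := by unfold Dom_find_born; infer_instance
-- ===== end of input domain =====

-- B scans the lines backwards, keeping the first hit per marker (= A's last hit), and stops
-- as soon as both line numbers are found, instead of A's full forward sweep (objective: alternative).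

def pvM1 : String := "BORN EFFECTIVE CHARGES"
def pvM2 : String := "INTERNAL STRAIN TENSOR FOR ION    1"

-- ===== PORT A =====
-- one loop step of A: state (line_num, start, end)
def pvStepA (st : Int × Int × Int) (i : String) : Int × Int × Int :=
  let ln := st.1 + 1
  if PySem.Str.isIn pvM1 i then (ln, ln, st.2.2)
  else if PySem.Str.isIn pvM2 i then (ln, st.2.1, ln)
  else (ln, st.2.1, st.2.2)

def find_born (x : List String) : List Int :=
  let st := x.foldl pvStepA (0, 0, 0)
  [st.2.1, st.2.2]

-- ===== PORT B =====
-- lines numbered from 1 (B's `enumerate`-style numbering of the materialized list)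
def pvEnum1 : Int → List String → List (Int × String)
  | _, [] => []
  | n, a :: r => (n + 1, a) :: pvEnum1 (n + 1) r

-- B's descending loop: walk the numbered lines back-to-front, record only still-missing
-- markers, break early once both are found
def pvGoB : List (Int × String) → Int → Int → List Int
  | [], s, e => [s, e]
  | (ln, line) :: rest, s, e =>
    let p : Int × Int :=
      if PySem.Str.isIn pvM1 line then ((if s = 0 then ln else s), e)
      else if PySem.Str.isIn pvM2 line ∧ e = 0 then (s, ln)
      else (s, e)
    if p.1 ≠ 0 ∧ p.2 ≠ 0 then [p.1, p.2] else pvGoB rest p.1 p.2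

def find_born_alt (x : List String) : List Int :=
  pvGoB (pvEnum1 0 x).reverse 0 0

-- ===== PRECONDITION & SPEC =====
def Spec_find_born (x : List String) (out : List Int) : Prop := out = find_born_alt x
instance (x : List String) (out : List Int) : Decidable (Spec_find_born x out) := by unfold Spec_find_born; infer_instance

-- ===== CLAIM (what is proved, stated in full; the proofs are below) =====
def Claim_equal_find_born : Prop := ∀ (x : List String), Dom_find_born x → Spec_find_born x (find_born x)

-- ===== LEMMAS AND PROOFS =====

-- last hit (forward fold) and first hit (front scan) over numbered lines
def pvLastF (p : String → Bool) (acc : Int) (l : List (Int × String)) : Int :=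
  l.foldl (fun a q => if p q.2 then q.1 else a) acc

def pvFirstF (p : String → Bool) : List (Int × String) → Int
  | [] => 0
  | q :: r => if p q.2 then q.1 else pvFirstF p r

def pvP1 (s : String) : Bool := PySem.Str.isIn pvM1 s
def pvP2 (s : String) : Bool := !PySem.Str.isIn pvM1 s && PySem.Str.isIn pvM2 s

theorem pvA_inv (x : List String) : ∀ (n s e : Int),
    x.foldl pvStepA (n, s, e) =
      (n + x.length, pvLastF pvP1 s (pvEnum1 n x), pvLastF pvP2 e (pvEnum1 n x)) := by
  induction x with
  | nil => intro n s e; simp [pvLastF, pvEnum1]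
  | cons a r ih =>
    intro n s e
    simp only [List.foldl_cons, pvStepA]
    split_ifs <;>
      simp_all [pvEnum1, pvLastF, pvP1, pvP2] <;>
      omega

theorem pvEnum1_pos (x : List String) : ∀ (n : Int), 0 ≤ n →
    ∀ q ∈ pvEnum1 n x, q.1 ≠ 0 := by
  induction x with
  | nil => intro n _ q hq; simp [pvEnum1] at hq
  | cons a r ih =>
    intro n hn q hq
    simp only [pvEnum1, List.mem_cons] at hq
    rcases hq with h | h
    · subst h; simp; omega
    · exact ih (n + 1) (by omega) q h

theorem pvB_inv (r : List (Int × String)) : ∀ (s e : Int),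
    (∀ q ∈ r, q.1 ≠ 0) →
    pvGoB r s e = [if s = 0 then pvFirstF pvP1 r else s,
                   if e = 0 then pvFirstF pvP2 r else e] := by
  induction r with
  | nil => intro s e _; simp [pvGoB, pvFirstF]
  | cons q rest ih =>
    obtain ⟨ln, line⟩ := q
    intro s e hpos
    have hln : ln ≠ 0 := hpos (ln, line) (List.mem_cons_self)
    have hrest : ∀ q ∈ rest, q.1 ≠ 0 := fun q hq => hpos q (List.mem_cons_of_mem _ hq)
    have ih' : ∀ (s e : Int),
        pvGoB rest s e = [if s = 0 then pvFirstF pvP1 rest else s,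
                          if e = 0 then pvFirstF pvP2 rest else e] :=
      fun s e => ih s e hrest
    simp only [pvGoB, pvFirstF, pvP1, pvP2]
    split_ifs <;> simp_all [ih']

theorem pvLastF_app (p : String → Bool) (acc : Int) (l : List (Int × String)) (q : Int × String) :
    pvLastF p acc (l ++ [q]) = if p q.2 then q.1 else pvLastF p acc l := by
  simp [pvLastF]

theorem pvFirst_rev (p : String → Bool) (l : List (Int × String)) :
    pvFirstF p l.reverse = pvLastF p 0 l := by
  induction l using List.reverseRecOn with
  | nil => simp [pvFirstF, pvLastF]
  | append_singleton u q ih =>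
    rw [List.reverse_append, pvLastF_app]
    simp only [List.reverse_singleton, List.singleton_append, pvFirstF]
    split_ifs <;> simp_all

-- ===== VERDICT (by name: the statement is the Claim_ definition above) =====
theorem find_born_spec : Claim_equal_find_born := by
  intro x _
  unfold Spec_find_born find_born find_born_alt
  rw [pvB_inv _ _ _ (by
        intro q hq
        exact pvEnum1_pos x 0 le_rfl q (List.mem_reverse.mp hq)), pvA_inv]
  simp [pvFirst_rev]
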